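-- pv_equiv track=rewrite | github.com/dlocke/nirvana-takehome | my_api/data_collector.py | _coalesce_by_minimum
-- ===== SOURCE A (Python) =====
-- def _coalesce_by_minimum(data):
--     result = {}
--     for category in data[0]:
--         values = []
--         for row in data:
--             values.append(row[category])
--
--         result[category] = min(values)
--
--     return result
-- ===== SOURCE B (Python) =====
-- def _coalesce_by_minimum(data):
--     # Row-major single pass keeping a running minimum per category.
--     result = dict(data[0])
--     for row in data[1:]:
--         for category in data[0]:
--             if row[category] < result[category]:
--                 result[category] = row[category]
--     return result
-- ===== Notes on version B (the rewrite author's own statement) =====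
-- stated objective: alternative
-- what changed: Replaces A's category-major pass (building a value list per category and calling min on it) with a single row-major pass that starts from a copy of the first row and keeps a running per-category minimum, allocating no intermediate lists.
import Mathlib
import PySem

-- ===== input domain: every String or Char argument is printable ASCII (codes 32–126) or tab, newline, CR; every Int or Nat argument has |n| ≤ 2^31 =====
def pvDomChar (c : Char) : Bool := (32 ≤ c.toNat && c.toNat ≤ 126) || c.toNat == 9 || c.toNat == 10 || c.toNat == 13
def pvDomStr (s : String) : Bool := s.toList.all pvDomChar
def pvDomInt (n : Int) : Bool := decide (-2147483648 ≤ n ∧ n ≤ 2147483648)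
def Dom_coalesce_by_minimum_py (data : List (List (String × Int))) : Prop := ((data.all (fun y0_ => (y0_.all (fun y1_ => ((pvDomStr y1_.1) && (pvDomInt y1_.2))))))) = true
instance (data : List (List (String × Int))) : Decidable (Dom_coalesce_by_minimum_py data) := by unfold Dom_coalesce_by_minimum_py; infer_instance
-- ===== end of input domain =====

-- B swaps A's category-major pass (list of values per category, then min) for a row-major
-- running-minimum pass starting from a copy of the first row (objective: alternative).

-- ===== PORT A =====
-- A: for each category of data[0], collect row[category] over all rows into a list, take min.
def coalesce_by_minimum_py (data : List (List (String × Int))) : List (String × Int) :=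
  let first := PySem.Dict.ofList (data.headD [])
  let result := first.keys.foldl (fun result category =>
    let values := data.foldl (fun vs row => vs ++ [(PySem.Dict.ofList row).getD category 0]) []
    result.insert category ((PySem.List.min? values (fun x => x)).getD 0)) PySem.Dict.empty
  result.items

-- ===== PORT B =====
-- B: result = dict(data[0]); one pass over the remaining rows updating a running minimum.
def coalesce_by_minimum_py_alt (data : List (List (String × Int))) : List (String × Int) :=
  let first := PySem.Dict.ofList (data.headD [])
  let result := (data.tail).foldl (fun result row =>
    let rowd := PySem.Dict.ofList row
    first.keys.foldl (fun res category =>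
      let v := rowd.getD category 0
      if v < res.getD category 0 then res.insert category v else res) result) first
  result.items

-- ===== PRECONDITION & SPEC =====
-- Pre_ excludes the inputs where Python A raises: empty data (IndexError on data[0]) and
-- rows missing a category of data[0] (KeyError on row[category]).
def Pre_coalesce_by_minimum_py (data : List (List (String × Int))) : Prop :=
  data ≠ [] ∧ ∀ row ∈ data, ∀ k ∈ (PySem.Dict.ofList (data.headD [])).keys,
    (PySem.Dict.ofList row).contains k = true
instance (data : List (List (String × Int))) : Decidable (Pre_coalesce_by_minimum_py data) := by
  unfold Pre_coalesce_by_minimum_py; infer_instance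

def pvWitness_coalesce_by_minimum_py : (List (List (String × Int))) :=
  [[("a", 1), ("b", 5)], [("a", 3), ("b", 2)]]

def Spec_coalesce_by_minimum_py (data : List (List (String × Int))) (out : List (String × Int)) : Prop := out = coalesce_by_minimum_py_alt data
instance (data : List (List (String × Int))) (out : List (String × Int)) : Decidable (Spec_coalesce_by_minimum_py data out) := by unfold Spec_coalesce_by_minimum_py; infer_instance

-- ===== CLAIM (what is proved, stated in full; the proofs are below) =====
def Claim_equal_coalesce_by_minimum_py : Prop := ∀ (data : List (List (String × Int))), Dom_coalesce_by_minimum_py data → Pre_coalesce_by_minimum_py data → Spec_coalesce_by_minimum_py data (coalesce_by_minimum_py data)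

-- ===== LEMMAS AND PROOFS =====

-- Inner loop of B: one row folded over a list of keys all present in res.
theorem pv_inner (ks : List String) (v : String → Int) :
    ∀ (d : PySem.Dict String Int), d.keys.Nodup → (∀ k ∈ ks, d.contains k = true) →
    (ks.foldl (fun res k => if v k < res.getD k 0 then res.insert k (v k) else res) d).items
      = d.items.map (fun p => if p.1 ∈ ks then (p.1, min p.2 (v p.1)) else p) := by
  induction ks with
  | nil => intro d _ _; simp
  | cons k ks ih =>
    intro d hnd hc
    have hck : d.contains k = true := hc k (by simp)
    by_cases hlt : v k < d.getD k 0
    · simp only [List.foldl_cons, if_pos hlt]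
      rw [ih (d.insert k (v k)) (PySem.Dict.nodup_keys_insert d k (v k) hnd)
          (by intro k' hk'
              rw [PySem.Dict.contains_insert]
              cases h : k' == k <;> simp_all [hc k' (by simp [hk'])])]
      rw [PySem.Dict.items_insert_of_contains d (v k) hck, List.map_map]
      apply List.map_congr_left
      intro p hp
      by_cases hpk : p.1 = k
      · have hp2 : p.2 = d.getD k 0 := by
          rw [← hpk, PySem.Dict.getD_of_mem_items d (by simpa using hp) hnd 0]
        simp only [Function.comp_apply, hpk, beq_self_eq_true, if_pos]
        have : min p.2 (v k) = v k := by rw [hp2]; omega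
        by_cases hkks : k ∈ ks <;> simp_all
      · simp [Function.comp_apply, hpk]
    · simp only [List.foldl_cons, if_neg hlt]
      rw [ih d hnd (by intro k' hk'; exact hc k' (by simp [hk']))]
      apply List.map_congr_left
      intro p hp
      by_cases hpk : p.1 = k
      · have hp2 : p.2 = d.getD k 0 := by
          rw [← hpk, PySem.Dict.getD_of_mem_items d (by simpa using hp) hnd 0]
        have hmin : min p.2 (v p.1) = p.2 := by rw [hp2, hpk]; omega
        by_cases hkks : p.1 ∈ ks <;>
          simp_all [Prod.ext_iff]
      · by_cases hkks : p.1 ∈ ks <;> simp_all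

-- Outer loop of B over the remaining rows.
theorem pv_outer (ks : List String) :
    ∀ (rows : List (List (String × Int))) (d : PySem.Dict String Int),
    d.keys.Nodup → (∀ k ∈ ks, d.contains k = true) →
    (rows.foldl (fun res row =>
        ks.foldl (fun res k =>
          if (PySem.Dict.ofList row).getD k 0 < res.getD k 0
          then res.insert k ((PySem.Dict.ofList row).getD k 0) else res) res) d).items
      = d.items.map (fun p =>
          if p.1 ∈ ks
          then (p.1, rows.foldl (fun a row => min a ((PySem.Dict.ofList row).getD p.1 0)) p.2)
          else p) := by
  intro rows
  induction rows with
  | nil => intro d _ _; simp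
  | cons row rows ih =>
    intro d hnd hc
    simp only [List.foldl_cons]
    have hinner := pv_inner ks (fun k => (PySem.Dict.ofList row).getD k 0) d hnd hc
    set d' := ks.foldl (fun res k =>
        if (PySem.Dict.ofList row).getD k 0 < res.getD k 0
        then res.insert k ((PySem.Dict.ofList row).getD k 0) else res) d with hd'
    have hkeys : d'.keys = d.keys := by
      show d'.items.map Prod.fst = d.items.map Prod.fst
      rw [hinner, List.map_map]
      apply List.map_congr_left
      intro p _
      by_cases h : p.1 ∈ ks <;> simp [h]
    rw [ih d' (by rw [hkeys]; exact hnd)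
        (by intro k hk
            rw [PySem.Dict.contains_iff_mem_keys, hkeys, ← PySem.Dict.contains_iff_mem_keys]
            exact hc k hk)]
    rw [hinner, List.map_map]
    apply List.map_congr_left
    intro p _
    by_cases h : p.1 ∈ ks <;> simp [h]

-- ===== VERDICT (by name: the statement is the Claim_ definition above) =====
theorem coalesce_by_minimum_py_spec : Claim_equal_coalesce_by_minimum_py := by
  intro data _ hpre
  obtain ⟨hne, _⟩ := hpre
  unfold Spec_coalesce_by_minimum_py coalesce_by_minimum_py coalesce_by_minimum_py_alt
  obtain ⟨r0, rows, rfl⟩ : ∃ r0 rows, data = r0 :: rows := by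
    cases data with
    | nil => exact absurd rfl hne
    | cons a l => exact ⟨a, l, rfl⟩
  simp only [List.headD_cons, List.tail_cons]
  set first := PySem.Dict.ofList r0 with hfirst
  have hnd : first.keys.Nodup := PySem.Dict.nodup_keys_ofList r0
  -- A side: fresh distinct keys inserted into an empty dict
  have hA := PySem.Dict.items_foldl_insert_fresh first.keys (fun c => c)
      (fun category => ((PySem.List.min?
          ((r0 :: rows).foldl (fun vs row => vs ++ [(PySem.Dict.ofList row).getD category 0]) [])
          (fun x => x)).getD 0))
      PySem.Dict.empty
      (by intro a _; exact PySem.Dict.contains_empty a) (by simpa using hnd)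
  simp only [] at hA
  rw [hA]
  -- B side: running minimum characterised by pv_outer
  rw [pv_outer first.keys rows first hnd
        (by intro k hk; exact (PySem.Dict.contains_iff_mem_keys first k).mpr hk)]
  rw [PySem.Dict.items_eq_map_keys first hnd 0, List.map_map]
  simp only [PySem.Dict.empty, List.nil_append]
  apply List.map_congr_left
  intro k hk
  simp only [Function.comp_apply, hk, if_pos]
  -- values list of A is a map over the rows
  have hvals : ((r0 :: rows).foldl (fun vs row => vs ++ [(PySem.Dict.ofList row).getD k 0]) [])
      = (r0 :: rows).map (fun row => (PySem.Dict.ofList row).getD k 0) := by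
    rw [PySem.List.foldl_append_singleton_eq_map, List.nil_append]
  rw [hvals, List.map_cons, PySem.List.min?_id_cons, Option.getD_some]
  rw [List.foldl_map]
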